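-- pv_equiv track=rewrite | github.com/holbizmetrics/primes-research | gap_ap_search.py | find_gap_ap
-- ===== SOURCE A (Python) =====
-- def find_gap_ap(primes, min_len=6):
--     """Find gap APs of length >= min_len."""
--     results = []
--     gaps = [primes[i+1] - primes[i] for i in range(len(primes)-1)]
--
--     for start in range(len(gaps) - min_len):
--         d = gaps[start + 1] - gaps[start]
--         if d == 0:
--             continue
--         length = 1
--         for j in range(start + 1, len(gaps) - 1):
--             if gaps[j + 1] - gaps[j] == d:
--                 length += 1
--             else:
--                 break
--         if length >= min_len:
--             results.append((primes[start], length + 1, gaps[start:start+length+1], d))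
--
--     return results
-- ===== SOURCE B (Python) =====
-- def find_gap_ap(primes, min_len=6):
--     """Find gap APs of length >= min_len (run-decomposition, one pass)."""
--     gaps = [q - p for p, q in zip(primes, primes[1:])]
--     diffs = [b - a for a, b in zip(gaps, gaps[1:])]
--     results = []
--     n = len(diffs)
--     i = 0
--     while i < n:
--         j = i
--         while j + 1 < n and diffs[j + 1] == diffs[i]:
--             j += 1
--         # maximal run diffs[i..j] of the constant second difference diffs[i]
--         if diffs[i] != 0:
--             for k in range(i, j - min_len + 2):
--                 results.append((primes[k], j - k + 2, gaps[k:j + 2], diffs[i]))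
--         i = j + 1
--     return results
-- ===== Notes on version B (the rewrite author's own statement) =====
-- stated objective: alternative
-- what changed: B decomposes the second-difference array into maximal constant runs in one pass and emits each qualifying suffix of a run directly, instead of A's per-start inner rescan of the gap array (A is quadratic when long runs exist, B is linear in input plus output).
import Mathlib
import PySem

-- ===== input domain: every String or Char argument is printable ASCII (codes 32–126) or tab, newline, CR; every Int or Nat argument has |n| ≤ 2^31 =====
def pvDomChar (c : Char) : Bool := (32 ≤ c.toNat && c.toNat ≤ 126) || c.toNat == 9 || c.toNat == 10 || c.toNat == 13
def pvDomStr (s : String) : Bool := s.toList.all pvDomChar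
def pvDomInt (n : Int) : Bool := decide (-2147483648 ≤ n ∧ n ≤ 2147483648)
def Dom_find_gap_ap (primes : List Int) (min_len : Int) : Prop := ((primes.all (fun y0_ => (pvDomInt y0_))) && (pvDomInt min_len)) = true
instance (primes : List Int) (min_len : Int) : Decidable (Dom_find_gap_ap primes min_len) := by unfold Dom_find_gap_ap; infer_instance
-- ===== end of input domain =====

-- B replaces A's per-start rescan of the gap array by a one-pass decomposition of the
-- second-difference array into maximal constant runs; equal on Pre_ (A raises IndexError outside it).

-- ===== PORT A =====
-- A's gaps comprehension: [primes[i+1] - primes[i] for i in range(len(primes)-1)]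
def gapsA (primes : List Int) : List Int :=
  (List.range (primes.length - 1)).map
    (fun (i : Nat) => PySem.List.pyGetD primes ((i : Int) + 1) 0 - PySem.List.pyGetD primes (i : Int) 0)

-- A's inner 'for j in range(start+1, len(gaps)-1): … else: break' loop
def aInner (gaps : List Int) (d stop j length : Int) : Int :=
  if j < stop then
    if PySem.List.pyGetD gaps (j + 1) 0 - PySem.List.pyGetD gaps j 0 = d then
      aInner gaps d stop (j + 1) (length + 1)
    else length
  else length
termination_by (stop - j).toNat
decreasing_by omega

def find_gap_ap (primes : List Int) (min_len : Int) : List (Int × Int × List Int × Int) :=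
  let gaps := gapsA primes
  (PySem.List.pyRange 0 ((gaps.length : Int) - min_len) 1).foldl
    (fun results start =>
      let d := PySem.List.pyGetD gaps (start + 1) 0 - PySem.List.pyGetD gaps start 0
      if d = 0 then results
      else
        let length := aInner gaps d ((gaps.length : Int) - 1) (start + 1) 1
        if min_len ≤ length then
          results ++ [(PySem.List.pyGetD primes start 0, length + 1,
            PySem.List.slice gaps (some start) (some (start + length + 1)), d)]
        else results) []

-- ===== PORT B =====
-- B's comprehension '[b - a for a, b in zip(xs, xs[1:])]' (used twice: gaps, diffs)
def zd (xs : List Int) : List Int := (xs.zip xs.tail).map (fun p => p.2 - p.1)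

-- B's inner 'while j + 1 < n and diffs[j+1] == diffs[i]: j += 1' loop
def bRun (diffs : List Int) (i j : Int) : Int :=
  if j + 1 < (diffs.length : Int) ∧
      PySem.List.pyGetD diffs (j + 1) 0 = PySem.List.pyGetD diffs i 0 then
    bRun diffs i (j + 1)
  else j
termination_by ((diffs.length : Int) - j).toNat
decreasing_by omega

-- needed for the termination of bLoop: the run end never precedes its start
theorem le_bRun (diffs : List Int) (i j : Int) : j ≤ bRun diffs i j := by
  rw [bRun]
  split
  · exact le_trans (by omega) (le_bRun diffs i (j + 1))
  · exact le_refl j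
termination_by ((diffs.length : Int) - j).toNat
decreasing_by omega

-- B's outer 'while i < n' loop
def bLoop (primes gaps diffs : List Int) (min_len i : Int)
    (results : List (Int × Int × List Int × Int)) : List (Int × Int × List Int × Int) :=
  if i < (diffs.length : Int) then
    let j := bRun diffs i i
    let results' :=
      if PySem.List.pyGetD diffs i 0 ≠ 0 then
        results ++ (PySem.List.pyRange i (j - min_len + 2) 1).map (fun k =>
          (PySem.List.pyGetD primes k 0, j - k + 2,
           PySem.List.slice gaps (some k) (some (j + 2)), PySem.List.pyGetD diffs i 0))
      else results
    bLoop primes gaps diffs min_len (j + 1) results'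
  else results
termination_by ((diffs.length : Int) - i).toNat
decreasing_by have := le_bRun diffs i i; omega

def find_gap_ap_alt (primes : List Int) (min_len : Int) : List (Int × Int × List Int × Int) :=
  let gaps := zd primes
  let diffs := zd gaps
  bLoop primes gaps diffs min_len 0 []

-- ===== PRECONDITION & SPEC =====
-- Pre_ excludes exactly the inputs on which Python A raises IndexError (min_len ≤ 0 while the
-- start range is nonempty, so 'gaps[start + 1]' runs past the end of gaps); A returns on all others.
def Pre_find_gap_ap (primes : List Int) (min_len : Int) : Prop :=
  1 ≤ min_len ∨ ((primes.length - 1 : Nat) : Int) ≤ min_len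
instance (primes : List Int) (min_len : Int) : Decidable (Pre_find_gap_ap primes min_len) := by
  unfold Pre_find_gap_ap; infer_instance

def pvWitness_find_gap_ap : List Int × Int := ([2, 3, 5, 7, 11, 13, 17, 19], 2)

def Spec_find_gap_ap (primes : List Int) (min_len : Int) (out : List (Int × Int × List Int × Int)) : Prop := out = find_gap_ap_alt primes min_len
instance (primes : List Int) (min_len : Int) (out : List (Int × Int × List Int × Int)) : Decidable (Spec_find_gap_ap primes min_len out) := by unfold Spec_find_gap_ap; infer_instance

-- ===== CLAIM (what is proved, stated in full; the proofs are below) =====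
def Claim_equal_find_gap_ap : Prop := ∀ (primes : List Int) (min_len : Int), Dom_find_gap_ap primes min_len → Pre_find_gap_ap primes min_len → Spec_find_gap_ap primes min_len (find_gap_ap primes min_len)

-- ===== LEMMAS AND PROOFS =====

-- the second difference at start k, as A computes it from gaps
def dval (gaps : List Int) (k : Int) : Int :=
  PySem.List.pyGetD gaps (k + 1) 0 - PySem.List.pyGetD gaps k 0

-- A's per-start contribution to the result list
def emitA (primes gaps : List Int) (min_len start : Int) : List (Int × Int × List Int × Int) :=
  if dval gaps start = 0 then []
  else if min_len ≤ aInner gaps (dval gaps start) ((gaps.length : Int) - 1) (start + 1) 1 then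
    [(PySem.List.pyGetD primes start 0,
      aInner gaps (dval gaps start) ((gaps.length : Int) - 1) (start + 1) 1 + 1,
      PySem.List.slice gaps (some start)
        (some (start + aInner gaps (dval gaps start) ((gaps.length : Int) - 1) (start + 1) 1 + 1)),
      dval gaps start)]
  else []

theorem pyGetD_nat (xs : List Int) (i : Nat) (h : i < xs.length) :
    PySem.List.pyGetD xs (i : Int) 0 = xs[i] := by
  simp [PySem.List.pyGetD_natCast, List.getD_eq_getElem?_getD, h]

theorem zd_length (xs : List Int) : (zd xs).length = xs.length - 1 := by
  simp [zd]

theorem zd_get (xs : List Int) (k : Nat) (h : k + 1 < xs.length) :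
    PySem.List.pyGetD (zd xs) (k : Int) 0 =
      PySem.List.pyGetD xs ((k : Int) + 1) 0 - PySem.List.pyGetD xs (k : Int) 0 := by
  have h1 : k < (zd xs).length := by rw [zd_length]; omega
  rw [pyGetD_nat (zd xs) k h1,
      show ((k : Int) + 1) = (((k + 1 : Nat)) : Int) by push_cast; ring,
      pyGetD_nat xs (k + 1) h, pyGetD_nat xs k (by omega)]
  simp [zd, List.getElem_zip, List.getElem_tail]

theorem zd_get_int (xs : List Int) (k : Int) (h0 : 0 ≤ k) (h : k < (xs.length : Int) - 1) :
    PySem.List.pyGetD (zd xs) k 0 = dval xs k := by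
  obtain ⟨m, rfl⟩ := Int.eq_ofNat_of_zero_le h0
  exact zd_get xs m (by omega)

theorem gapsA_length (primes : List Int) : (gapsA primes).length = primes.length - 1 := by
  simp [gapsA]

theorem zd_eq_gapsA (primes : List Int) : zd primes = gapsA primes := by
  apply List.ext_getElem
  · rw [zd_length, gapsA_length]
  · intro i h1 h2
    have hi : i + 1 < primes.length := by
      have := zd_length primes; omega
    simp only [zd, gapsA, List.getElem_map, List.getElem_zip, List.getElem_tail,
      List.getElem_range]
    rw [show ((i : Int) + 1) = (((i + 1 : Nat)) : Int) by push_cast; ring,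
        pyGetD_nat primes (i + 1) hi, pyGetD_nat primes i (by omega)]

-- A's loop body, folded into a flatMap of per-start contributions
theorem A_body (primes gaps : List Int) (min_len : Int) (l : List Int)
    (acc : List (Int × Int × List Int × Int)) :
    l.foldl (fun results start =>
      let d := PySem.List.pyGetD gaps (start + 1) 0 - PySem.List.pyGetD gaps start 0
      if d = 0 then results
      else
        let length := aInner gaps d ((gaps.length : Int) - 1) (start + 1) 1
        if min_len ≤ length then
          results ++ [(PySem.List.pyGetD primes start 0, length + 1,
            PySem.List.slice gaps (some start) (some (start + length + 1)), d)]
        else results) acc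
    = acc ++ l.flatMap (emitA primes gaps min_len) := by
  induction l generalizing acc with
  | nil => simp
  | cons x xs ih =>
    rw [List.foldl_cons, List.flatMap_cons, ih, ← List.append_assoc]
    congr 1
    show (if dval gaps x = 0 then acc
      else if min_len ≤ aInner gaps (dval gaps x) ((gaps.length : Int) - 1) (x + 1) 1 then
        acc ++ [(PySem.List.pyGetD primes x 0,
          aInner gaps (dval gaps x) ((gaps.length : Int) - 1) (x + 1) 1 + 1,
          PySem.List.slice gaps (some x)
            (some (x + aInner gaps (dval gaps x) ((gaps.length : Int) - 1) (x + 1) 1 + 1)),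
          dval gaps x)]
      else acc) = acc ++ emitA primes gaps min_len x
    simp only [emitA]
    split_ifs <;> simp

theorem A_flat (primes : List Int) (min_len : Int) :
    find_gap_ap primes min_len =
      (PySem.List.pyRange 0 (((gapsA primes).length : Int) - min_len) 1).flatMap
        (emitA primes (gapsA primes) min_len) := by
  have := A_body primes (gapsA primes) min_len
    (PySem.List.pyRange 0 (((gapsA primes).length : Int) - min_len) 1) []
  simpa using this

-- A's inner loop never counts past the end
theorem aInner_le (gaps : List Int) (d stop j acc : Int) (h : j ≤ stop) :
    aInner gaps d stop j acc ≤ acc + (stop - j) := by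
  rw [aInner]
  split
  · split
    · have := aInner_le gaps d stop (j + 1) (acc + 1) (by omega)
      omega
    · omega
  · omega
termination_by (stop - j).toNat
decreasing_by omega

-- on a maximal constant run [i..j] of second differences, A's inner loop from j' counts j + 1 - j'
theorem aInner_run (gaps : List Int) (i j : Int) (stop : Int) (hjs : j < stop)
    (hrun : ∀ t, i ≤ t → t ≤ j → dval gaps t = dval gaps i)
    (hmax : stop ≤ j + 1 ∨ dval gaps (j + 1) ≠ dval gaps i)
    (j' acc : Int) (hij' : i ≤ j') (hj' : j' ≤ j + 1) :
    aInner gaps (dval gaps i) stop j' acc = acc + (j + 1 - j') := by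
  rw [aInner]
  by_cases hcase : j' ≤ j
  · rw [if_pos (by omega)]
    rw [show PySem.List.pyGetD gaps (j' + 1) 0 - PySem.List.pyGetD gaps j' 0 = dval gaps j' from rfl]
    rw [hrun j' hij' hcase, if_pos rfl]
    have := aInner_run gaps i j stop hjs hrun hmax (j' + 1) (acc + 1) (by omega) (by omega)
    omega
  · have hj'' : j' = j + 1 := by omega
    subst hj''
    rw [show PySem.List.pyGetD gaps (j + 1 + 1) 0 - PySem.List.pyGetD gaps (j + 1) 0
        = dval gaps (j + 1) from rfl]
    split
    next hlt =>
      have hne : dval gaps (j + 1) ≠ dval gaps i := by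
        rcases hmax with h | h
        · omega
        · exact h
      rw [if_neg hne]
      omega
    next => omega
termination_by (j + 1 - j').toNat
decreasing_by omega

-- starts at or past len(gaps) - min_len contribute nothing
theorem emitA_vanish (primes gaps : List Int) (min_len start : Int)
    (hm : (gaps.length : Int) - min_len ≤ start) (hlt : start < (gaps.length : Int) - 1) :
    emitA primes gaps min_len start = [] := by
  unfold emitA
  split_ifs with h1 h2
  · rfl
  · exfalso
    have := aInner_le gaps (dval gaps start) ((gaps.length : Int) - 1) (start + 1) 1 (by omega)
    omega
  · rfl

-- on a maximal run, A's contribution at each start, in closed form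
theorem emitA_run (primes gaps : List Int) (min_len i j : Int) (hjs : j < (gaps.length : Int) - 1)
    (hrun : ∀ t, i ≤ t → t ≤ j → dval gaps t = dval gaps i)
    (hmax : (gaps.length : Int) - 1 ≤ j + 1 ∨ dval gaps (j + 1) ≠ dval gaps i)
    (k : Int) (hik : i ≤ k) (hkj : k ≤ j) :
    emitA primes gaps min_len k =
      if dval gaps i = 0 then []
      else if min_len ≤ j - k + 1 then
        [(PySem.List.pyGetD primes k 0, j - k + 2,
          PySem.List.slice gaps (some k) (some (j + 2)), dval gaps i)]
      else [] := by
  unfold emitA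
  rw [hrun k hik hkj]
  by_cases h0 : dval gaps i = 0
  · simp [h0]
  · rw [if_neg h0, if_neg h0]
    have hL : aInner gaps (dval gaps i) ((gaps.length : Int) - 1) (k + 1) 1 = j - k + 1 := by
      have := aInner_run gaps i j ((gaps.length : Int) - 1) hjs hrun hmax (k + 1) 1
        (by omega) (by omega)
      omega
    rw [hL]
    split_ifs with h2
    · rw [show k + (j - k + 1) + 1 = j + 2 by ring, show j - k + 1 + 1 = j - k + 2 by ring]
    · rfl

theorem flatMap_singleton_map (l : List Int) (f : Int → (Int × Int × List Int × Int)) :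
    l.flatMap (fun x => [f x]) = l.map f := by
  induction l <;> simp [*]

-- bRun stays in range
theorem bRun_lt (diffs : List Int) (i j : Int) (h : j < (diffs.length : Int)) :
    bRun diffs i j < (diffs.length : Int) := by
  rw [bRun]
  split
  next hc => exact bRun_lt diffs i (j + 1) hc.1
  next => exact h
termination_by ((diffs.length : Int) - j).toNat
decreasing_by omega

-- the values on [i, bRun i j] are all diffs[i]
theorem bRun_const (diffs : List Int) (i j : Int)
    (hbase : ∀ t, i ≤ t → t ≤ j → PySem.List.pyGetD diffs t 0 = PySem.List.pyGetD diffs i 0) :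
    ∀ t, i ≤ t → t ≤ bRun diffs i j → PySem.List.pyGetD diffs t 0 = PySem.List.pyGetD diffs i 0 := by
  rw [bRun]
  split
  next hc =>
    exact bRun_const diffs i (j + 1) (fun t ht1 ht2 => by
      by_cases h : t ≤ j
      · exact hbase t ht1 h
      · have : t = j + 1 := by omega
        rw [this]; exact hc.2)
  next => exact hbase
termination_by ((diffs.length : Int) - j).toNat
decreasing_by omega

-- bRun is maximal
theorem bRun_max (diffs : List Int) (i j : Int) :
    (diffs.length : Int) ≤ bRun diffs i j + 1 ∨
      PySem.List.pyGetD diffs (bRun diffs i j + 1) 0 ≠ PySem.List.pyGetD diffs i 0 := by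
  rw [bRun]
  split
  next => exact bRun_max diffs i (j + 1)
  next hc =>
    rcases not_and_or.mp hc with h | h
    · left; omega
    · right; exact h
termination_by ((diffs.length : Int) - j).toNat
decreasing_by omega

-- B's per-run emission equals the flatMap of A's per-start contributions over the run
theorem run_emit (primes gaps : List Int) (min_len i j : Int) (hml : 1 ≤ min_len)
    (_hij : i ≤ j) (hjs : j < (gaps.length : Int) - 1)
    (hrun : ∀ t, i ≤ t → t ≤ j → dval gaps t = dval gaps i)
    (hmax : (gaps.length : Int) - 1 ≤ j + 1 ∨ dval gaps (j + 1) ≠ dval gaps i) :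
    (PySem.List.pyRange i (j + 1) 1).flatMap (emitA primes gaps min_len) =
      if dval gaps i ≠ 0 then
        (PySem.List.pyRange i (j - min_len + 2) 1).map (fun k =>
          (PySem.List.pyGetD primes k 0, j - k + 2,
           PySem.List.slice gaps (some k) (some (j + 2)), dval gaps i))
      else [] := by
  by_cases h0 : dval gaps i = 0
  · rw [if_neg (by simp [h0])]
    apply List.flatMap_eq_nil_iff.mpr
    intro k hk
    rw [PySem.List.mem_pyRange_one] at hk
    rw [emitA_run primes gaps min_len i j hjs hrun hmax k hk.1 (by omega), if_pos h0]
  · rw [if_pos h0]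
    by_cases he : i ≤ j - min_len + 2
    · rw [PySem.List.pyRange_one_append i (j - min_len + 2) (j + 1) he (by omega),
          List.flatMap_append]
      have h1 : (PySem.List.pyRange i (j - min_len + 2) 1).flatMap (emitA primes gaps min_len) =
          (PySem.List.pyRange i (j - min_len + 2) 1).map (fun k =>
            (PySem.List.pyGetD primes k 0, j - k + 2,
             PySem.List.slice gaps (some k) (some (j + 2)), dval gaps i)) := by
        rw [List.flatMap_congr (g := fun k =>
            [(PySem.List.pyGetD primes k 0, j - k + 2,
              PySem.List.slice gaps (some k) (some (j + 2)), dval gaps i)])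
            (by intro k hk
                rw [PySem.List.mem_pyRange_one] at hk
                rw [emitA_run primes gaps min_len i j hjs hrun hmax k hk.1 (by omega),
                    if_neg h0, if_pos (by omega)])]
        exact flatMap_singleton_map _ _
      have h2 : (PySem.List.pyRange (j - min_len + 2) (j + 1) 1).flatMap
          (emitA primes gaps min_len) = [] := by
        apply List.flatMap_eq_nil_iff.mpr
        intro k hk
        rw [PySem.List.mem_pyRange_one] at hk
        rw [emitA_run primes gaps min_len i j hjs hrun hmax k (by omega) (by omega),
            if_neg h0, if_neg (by omega)]
      rw [h1, h2, List.append_nil]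
    · rw [show PySem.List.pyRange i (j - min_len + 2) 1 = []
          from PySem.List.pyRange_one_eq_nil (by omega), List.map_nil]
      apply List.flatMap_eq_nil_iff.mpr
      intro k hk
      rw [PySem.List.mem_pyRange_one] at hk
      rw [emitA_run primes gaps min_len i j hjs hrun hmax k hk.1 (by omega),
          if_neg h0, if_neg (by omega)]

-- B's loop accumulates the flatMap of A's contributions over the remaining start range
theorem bLoop_flat (primes gaps : List Int) (min_len : Int) (hml : 1 ≤ min_len)
    (i : Int) (results : List (Int × Int × List Int × Int)) (hi : 0 ≤ i) :
    bLoop primes gaps (zd gaps) min_len i results =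
      results ++ (PySem.List.pyRange i (((zd gaps).length : Int)) 1).flatMap
        (emitA primes gaps min_len) := by
  rw [bLoop]
  split
  next hlt =>
    have hzl := zd_length gaps
    have hglen : ((zd gaps).length : Int) = (gaps.length : Int) - 1 := by omega
    have hj0 : i ≤ bRun (zd gaps) i i := le_bRun _ _ _
    have hjlt : bRun (zd gaps) i i < ((zd gaps).length : Int) := bRun_lt _ _ _ hlt
    have hdv : ∀ t, 0 ≤ t → t < ((zd gaps).length : Int) →
        PySem.List.pyGetD (zd gaps) t 0 = dval gaps t := by
      intro t ht1 ht2
      exact zd_get_int gaps t ht1 (by omega)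
    have hconstd := bRun_const (zd gaps) i i (fun t ht1 ht2 => by
      have : t = i := by omega
      rw [this])
    have hrun : ∀ t, i ≤ t → t ≤ bRun (zd gaps) i i → dval gaps t = dval gaps i := by
      intro t ht1 ht2
      rw [← hdv t (by omega) (by omega), ← hdv i hi hlt]
      exact hconstd t ht1 ht2
    have hmax : (gaps.length : Int) - 1 ≤ bRun (zd gaps) i i + 1 ∨
        dval gaps (bRun (zd gaps) i i + 1) ≠ dval gaps i := by
      rcases bRun_max (zd gaps) i i with h | h
      · left; omega
      · by_cases hb : bRun (zd gaps) i i + 1 < ((zd gaps).length : Int)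
        · right
          rw [← hdv _ (by omega) hb, ← hdv i hi hlt]
          exact h
        · left; omega
    refine Eq.trans (bLoop_flat primes gaps min_len hml (bRun (zd gaps) i i + 1)
      (if PySem.List.pyGetD (zd gaps) i 0 ≠ 0 then
        results ++ (PySem.List.pyRange i (bRun (zd gaps) i i - min_len + 2) 1).map (fun k =>
          (PySem.List.pyGetD primes k 0, bRun (zd gaps) i i - k + 2,
           PySem.List.slice gaps (some k) (some (bRun (zd gaps) i i + 2)),
           PySem.List.pyGetD (zd gaps) i 0))
      else results) (by omega)) ?_
    rw [hdv i hi hlt]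
    rw [PySem.List.pyRange_one_append i (bRun (zd gaps) i i + 1) ((zd gaps).length : Int)
        (by omega) (by omega), List.flatMap_append]
    rw [run_emit primes gaps min_len i (bRun (zd gaps) i i) hml hj0 (by omega) hrun hmax]
    by_cases h0 : dval gaps i = 0
    · simp [h0]
    · rw [if_pos (by simpa using h0), if_pos (by simpa using h0), List.append_assoc]
  next hge =>
    rw [PySem.List.pyRange_one_eq_nil (by omega)]
    simp
termination_by (((zd gaps).length : Int) - i).toNat
decreasing_by have := le_bRun (zd gaps) i i; omega

-- ===== VERDICT (by name: the statement is the Claim_ definition above) =====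
theorem find_gap_ap_spec : Claim_equal_find_gap_ap := by
  intro primes min_len hdom hpre
  unfold Spec_find_gap_ap
  have hB : find_gap_ap_alt primes min_len
      = bLoop primes (gapsA primes) (zd (gapsA primes)) min_len 0 [] := by
    show bLoop primes (zd primes) (zd (zd primes)) min_len 0 [] = _
    rw [zd_eq_gapsA]
  by_cases hml : 1 ≤ min_len
  · rw [A_flat, hB, bLoop_flat primes (gapsA primes) min_len hml 0 [] le_rfl,
        List.nil_append]
    have hzl := zd_length (gapsA primes)
    by_cases hm : 0 < ((gapsA primes).length : Int) - min_len
    · rw [PySem.List.pyRange_one_append 0 (((gapsA primes).length : Int) - min_len)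
          (((zd (gapsA primes)).length : Int)) (by omega) (by omega), List.flatMap_append]
      have hnil : (PySem.List.pyRange (((gapsA primes).length : Int) - min_len)
          (((zd (gapsA primes)).length : Int)) 1).flatMap
          (emitA primes (gapsA primes) min_len) = [] := by
        apply List.flatMap_eq_nil_iff.mpr
        intro k hk
        rw [PySem.List.mem_pyRange_one] at hk
        exact emitA_vanish primes (gapsA primes) min_len k hk.1 (by omega)
      rw [hnil, List.append_nil]
    · rw [show PySem.List.pyRange 0 (((gapsA primes).length : Int) - min_len) 1 = []
          from PySem.List.pyRange_one_eq_nil (by omega)]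
      simp only [List.flatMap_nil]
      symm
      apply List.flatMap_eq_nil_iff.mpr
      intro k hk
      rw [PySem.List.mem_pyRange_one] at hk
      exact emitA_vanish primes (gapsA primes) min_len k (by omega) (by omega)
  · -- min_len ≤ 0: Pre_ forces min_len = 0 and len(primes) ≤ 1, both sides are []
    rcases hpre with h | h
    · omega
    have hml0 : min_len = 0 := by omega
    have hlen : primes.length - 1 = 0 := by omega
    subst hml0
    have hg : (gapsA primes).length = 0 := by rw [gapsA_length]; exact hlen
    rw [A_flat, hg, hB]
    rw [show ((0 : Nat) : Int) - 0 = 0 by simp, PySem.List.pyRange_one_eq_nil le_rfl,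
        List.flatMap_nil]
    rw [bLoop, if_neg (by
      have h1 := zd_length (gapsA primes)
      omega)]
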